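-- pv_equiv track=rewrite | github.com/rohittiwarirvt/dsa | python/strings/minimumCharactersForWords.py | createListfromCharacterFrequency
-- ===== SOURCE A (Python) =====
-- def createListfromCharacterFrequency(listOfFrequecy):
--   characters =[]
--   for character in listOfFrequecy:
--     frequency = listOfFrequecy[character]
--
--     for _ in range(frequency):
--       characters.append(character)
--
--   characters.sort()
--
--   return characters
-- ===== SOURCE B (Python) =====
-- def createListfromCharacterFrequency(listOfFrequecy):
--   out = []
--   for character in sorted(listOfFrequecy):
--     out.extend([character] * listOfFrequecy[character])
--   return out
-- ===== Notes on version B (the rewrite author's own statement) =====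
-- stated objective: alternative
-- what changed: Instead of expanding every key into a repeated list of total length N and then sorting that list, B sorts only the unique dict keys and emits each key's replicate block in key order; it trades the sort of the expanded list for a sort of the keys.
import Mathlib
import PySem

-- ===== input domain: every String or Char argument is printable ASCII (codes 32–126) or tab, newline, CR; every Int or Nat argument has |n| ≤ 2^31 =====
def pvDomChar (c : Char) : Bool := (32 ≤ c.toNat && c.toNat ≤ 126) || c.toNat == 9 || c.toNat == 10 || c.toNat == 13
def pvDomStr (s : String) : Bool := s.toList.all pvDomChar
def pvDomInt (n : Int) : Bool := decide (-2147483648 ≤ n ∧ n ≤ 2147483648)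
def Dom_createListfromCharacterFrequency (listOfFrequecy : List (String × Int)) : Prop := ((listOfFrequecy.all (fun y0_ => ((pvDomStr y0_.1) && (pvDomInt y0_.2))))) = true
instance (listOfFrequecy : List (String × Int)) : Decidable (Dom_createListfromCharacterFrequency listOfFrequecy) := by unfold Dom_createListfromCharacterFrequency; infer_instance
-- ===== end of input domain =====

-- B sorts only the (unique) dict keys and emits each key repeated by its frequency,
-- instead of A's building of the full repeated list and then sorting it (objective: alternative algorithm, sort keys not the expansion).

-- ===== PORT A =====
-- Python A receives a dict; per the type convention it arrives as an association list
-- (insertion order, lookup = first match). 'listOfFrequecy[character]' is a dict lookup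
-- with a key that is always present, so '.getD 0' never takes its default.
def createListfromCharacterFrequency (listOfFrequecy : List (String × Int)) : List String :=
  let characters := listOfFrequecy.foldl
    (fun characters kv =>
      let character := kv.1
      let frequency := ((PySem.Dict.mk listOfFrequecy).get? character).getD 0
      -- for _ in range(frequency): characters.append(character)
      (PySem.List.pyRange 0 frequency 1).foldl (fun cs _ => cs ++ [character]) characters)
    []
  PySem.List.sorted characters (fun x => x) false

-- ===== PORT B =====
-- 'for character in sorted(listOfFrequecy): out.extend([character] * listOfFrequecy[character])'
def createListfromCharacterFrequency_alt (listOfFrequecy : List (String × Int)) : List String :=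
  (PySem.List.sorted (listOfFrequecy.map Prod.fst) (fun x => x) false).foldl
    (fun out character =>
      out ++ List.replicate (((PySem.Dict.mk listOfFrequecy).get? character).getD 0).toNat character)
    []

-- ===== PRECONDITION & SPEC =====
def Spec_createListfromCharacterFrequency (listOfFrequecy : List (String × Int)) (out : List String) : Prop := out = createListfromCharacterFrequency_alt listOfFrequecy
instance (listOfFrequecy : List (String × Int)) (out : List String) : Decidable (Spec_createListfromCharacterFrequency listOfFrequecy out) := by unfold Spec_createListfromCharacterFrequency; infer_instance

-- ===== CLAIM (what is proved, stated in full; the proofs are below) =====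
def Claim_equal_createListfromCharacterFrequency : Prop := ∀ (listOfFrequecy : List (String × Int)), Dom_createListfromCharacterFrequency listOfFrequecy → Spec_createListfromCharacterFrequency listOfFrequecy (createListfromCharacterFrequency listOfFrequecy)

-- ===== LEMMAS AND PROOFS =====

-- A's inner append-one-at-a-time loop builds a replicate block.
theorem foldl_append_one {α : Type} (l : List α) (c : String) (acc : List String) :
    l.foldl (fun cs _ => cs ++ [c]) acc = acc ++ List.replicate l.length c := by
  induction l generalizing acc with
  | nil => simp
  | cons x xs ih => simp [List.foldl_cons, ih, List.replicate_succ]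

-- ===== VERDICT (by name: the statement is the Claim_ definition above) =====
theorem createListfromCharacterFrequency_spec : Claim_equal_createListfromCharacterFrequency := by
  intro d _
  show _ = _
  unfold createListfromCharacterFrequency createListfromCharacterFrequency_alt
  set f : String → Nat := fun c => (((PySem.Dict.mk d).get? c).getD 0).toNat with hf
  have hblk : ∀ (c : String) (acc : List String) (n : Int),
      (PySem.List.pyRange 0 n 1).foldl (fun cs _ => cs ++ [c]) acc = acc ++ List.replicate n.toNat c := by
    intro c acc n
    rw [foldl_append_one]
    congr 1
    simp [pysem]
  simp only [hblk]
  rw [PySem.List.foldl_append_eq_flatMap (g := fun c => List.replicate (f c) c),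
      List.nil_append]
  have hA : d.foldl (fun characters kv => characters ++ List.replicate (f kv.1) kv.1) []
      = d.flatMap (fun kv => List.replicate (f kv.1) kv.1) := by
    rw [PySem.List.foldl_append_eq_flatMap (g := fun kv : String × Int => List.replicate (f kv.1) kv.1),
        List.nil_append]
  rw [hA]
  set ks := PySem.List.sorted (d.map Prod.fst) (fun x => x) false with hks
  apply PySem.List.sorted_id_eq_of_perm_of_pairwise
  · -- permutation: sorted-keys blocks ~ entry-order blocks
    have h1 : (ks.flatMap (fun c => List.replicate (f c) c)).Perm
        ((d.map Prod.fst).flatMap (fun c => List.replicate (f c) c)) :=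
      List.Perm.flatMap_right _ (PySem.List.sorted_perm _ _ _)
    have h2 : (d.map Prod.fst).flatMap (fun c => List.replicate (f c) c)
        = d.flatMap (fun kv => List.replicate (f kv.1) kv.1) :=
      List.flatMap_map Prod.fst _ d
    exact h2 ▸ h1
  · -- sortedness: blocks are constant, block heads are ordered
    rw [List.pairwise_flatMap]
    refine ⟨fun a _ => List.pairwise_replicate.mpr (Or.inr le_rfl), ?_⟩
    have hp : ks.Pairwise (fun a b => (fun x => x) a ≤ (fun x => x) b) :=
      PySem.List.sorted_pairwise _ _
    refine hp.imp ?_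
    intro a b hab x hx y hy
    rw [List.eq_of_mem_replicate hx, List.eq_of_mem_replicate hy]
    exact hab
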